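-- pv_equiv track=rewrite | github.com/miguelclsouto/FEUP-L.EIC | Fundamentos da Programação/QPs/QP5/exercise3.py | mask_data
-- ===== SOURCE A (Python) =====
-- def mask_data(data, n_characters, position):
--
--     new_data = ""
--
--     temp = -1
--
--     if position == "begin":
--
--         temp = 1
--
--     length = len(data)
--
--     for i in range(0, length):
--
--         if (not (i < n_characters) and position == "begin") or (not(i >= length - n_characters) and position == "end"):
--
--             new_data += data[i]
--
--             continue
--
--         new_data += "*"
--
--     return new_data
-- ===== SOURCE B (Python) =====
-- def mask_data(data, n_characters, position):
--     count = max(0, min(n_characters, len(data)))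
--     if position == "begin":
--         return "*" * count + data[count:]
--     if position == "end":
--         return data[:len(data) - count] + "*" * count
--     return "*" * len(data)
-- ===== Notes on version B (the rewrite author's own statement) =====
-- stated objective: faster
-- what changed: Replaces the per-character index loop (repeated string concatenation and per-index comparisons) with a clamped mask count plus bulk string repetition and slicing (three direct cases: begin, end, fall-through masks everything).
import Mathlib
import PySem

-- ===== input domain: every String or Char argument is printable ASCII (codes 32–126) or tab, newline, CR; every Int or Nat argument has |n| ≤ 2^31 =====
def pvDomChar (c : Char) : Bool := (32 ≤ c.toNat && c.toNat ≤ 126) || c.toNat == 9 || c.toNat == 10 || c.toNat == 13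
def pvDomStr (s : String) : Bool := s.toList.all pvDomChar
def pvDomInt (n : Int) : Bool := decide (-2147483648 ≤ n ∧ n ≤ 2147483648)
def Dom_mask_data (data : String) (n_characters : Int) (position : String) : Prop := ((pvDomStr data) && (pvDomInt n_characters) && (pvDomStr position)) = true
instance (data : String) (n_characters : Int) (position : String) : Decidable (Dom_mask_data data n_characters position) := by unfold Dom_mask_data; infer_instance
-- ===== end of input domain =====

-- B replaces A's per-character index loop by a clamped mask count plus bulk replication and slicing (measured constant-factor faster).

-- ===== PORT A =====
-- literal port of A's index loop; A's variable 'temp' is dead (written, never read) and is omitted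
def mask_data (data : String) (n_characters : Int) (position : String) : String :=
  let length : Int := PySem.Str.len data
  String.ofList <|
    (PySem.List.pyRange 0 length 1).foldl
      (fun new_data i =>
        if (¬ (i < n_characters) ∧ position = "begin") ∨
           (¬ (i ≥ length - n_characters) ∧ position = "end") then
          new_data ++ [PySem.List.pyGetD data.toList i ' ']   -- data[i]: i is always in range here
        else
          new_data ++ ['*'])
      []

-- ===== PORT B =====
def mask_data_alt (data : String) (n_characters : Int) (position : String) : String :=
  let length : Int := PySem.Str.len data
  let count : Int := max 0 (min n_characters length)
  if position = "begin" then
    String.ofList (List.replicate count.toNat '*' ++ data.toList.drop count.toNat)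
  else if position = "end" then
    String.ofList (data.toList.take (length - count).toNat ++ List.replicate count.toNat '*')
  else
    String.ofList (List.replicate data.toList.length '*')

-- ===== PRECONDITION & SPEC =====
def Spec_mask_data (data : String) (n_characters : Int) (position : String) (out : String) : Prop := out = mask_data_alt data n_characters position
instance (data : String) (n_characters : Int) (position : String) (out : String) : Decidable (Spec_mask_data data n_characters position out) := by unfold Spec_mask_data; infer_instance

-- ===== CLAIM (what is proved, stated in full; the proofs are below) =====
def Claim_equal_mask_data : Prop := ∀ (data : String) (n_characters : Int) (position : String), Dom_mask_data data n_characters position → Spec_mask_data data n_characters position (mask_data data n_characters position)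

-- ===== LEMMAS AND PROOFS =====

-- A's loop, phrased as a map over the index range
theorem mask_data_eq_map (data : String) (n_characters : Int) (position : String) :
    mask_data data n_characters position =
    String.ofList ((List.range data.toList.length).map
      (fun (k : Nat) =>
        if (¬ ((k : Int) < n_characters) ∧ position = "begin") ∨
           (¬ ((k : Int) ≥ (data.toList.length : Int) - n_characters) ∧ position = "end") then
          data.toList.getD k ' '
        else '*')) := by
  unfold mask_data
  dsimp only
  have hfun : (fun (new_data : List Char) (i : Int) =>
      if (¬ (i < n_characters) ∧ position = "begin") ∨
         (¬ (i ≥ (PySem.Str.len data) - n_characters) ∧ position = "end") then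
        new_data ++ [PySem.List.pyGetD data.toList i ' ']
      else new_data ++ ['*']) =
      (fun (new_data : List Char) (i : Int) =>
        new_data ++ [if (¬ (i < n_characters) ∧ position = "begin") ∨
           (¬ (i ≥ (PySem.Str.len data) - n_characters) ∧ position = "end") then
          PySem.List.pyGetD data.toList i ' ' else '*']) := by
    funext a i; split <;> rfl
  rw [hfun, PySem.List.foldl_append_singleton_eq_map, PySem.List.pyRange_one]
  simp only [PySem.Str.len_eq, Int.sub_zero, Int.toNat_natCast, List.map_map]
  congr 1
  apply List.map_congr_left
  intro k _
  simp [Function.comp, PySem.List.pyGetD_natCast, List.getD_eq_getElem?_getD]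

theorem getD_eq_get (l : List Char) (k : Nat) (h : k < l.length) : l.getD k ' ' = l[k] := by
  simp [List.getD_eq_getElem?_getD, List.getElem?_eq_getElem h]

-- ===== VERDICT (by name: the statement is the Claim_ definition above) =====
theorem mask_data_spec : Claim_equal_mask_data := by
  intro data n position _
  unfold Spec_mask_data
  rw [mask_data_eq_map]
  unfold mask_data_alt
  dsimp only
  set l := data.toList with hl
  set L : Int := PySem.Str.len data with hL
  have hLlen : L = (l.length : Int) := by simp [hL, hl, PySem.Str.len_eq]
  set count : Int := max 0 (min n L) with hc
  have hc0 : 0 ≤ count := le_max_left _ _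
  have hcle : count ≤ (l.length : Int) := by omega
  have hcn : (count.toNat : Int) = count := Int.toNat_of_nonneg hc0
  by_cases hb : position = "begin"
  · rw [if_pos hb]
    congr 1
    have hne : position ≠ "end" := by rw [hb]; decide
    apply List.ext_getElem
    · simp only [List.length_map, List.length_range, List.length_append,
        List.length_replicate, List.length_drop]
      omega
    · intro k h1 h2
      have hkl : k < l.length := by simpa using h1
      have hcond : ((¬ ((k : Int) < n) ∧ position = "begin") ∨
          (¬ ((k : Int) ≥ (l.length : Int) - n) ∧ position = "end")) ↔
          ¬ (k < count.toNat) := by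
        constructor
        · rintro (⟨h, _⟩ | ⟨_, hpe⟩)
          · omega
          · exact absurd hpe hne
        · intro h; exact Or.inl ⟨by omega, hb⟩
      rw [List.getElem_map, List.getElem_range]
      by_cases hk : k < count.toNat
      · rw [if_neg (by rw [hcond]; omega),
          List.getElem_append_left (by simpa using hk), List.getElem_replicate]
      · rw [if_pos (hcond.mpr hk), getD_eq_get l k hkl,
          List.getElem_append_right (by simpa using hk), List.getElem_drop]
        congr 1
        simp only [List.length_replicate]
        omega
  · rw [if_neg hb]
    by_cases he : position = "end"
    · rw [if_pos he]
      congr 1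
      have hnb : position ≠ "begin" := hb
      set t : Nat := (L - count).toNat with ht
      have htval : t = l.length - count.toNat := by omega
      apply List.ext_getElem
      · simp only [List.length_map, List.length_range, List.length_append,
          List.length_replicate, List.length_take]
        omega
      · intro k h1 h2
        have hkl : k < l.length := by simpa using h1
        have hcond : ((¬ ((k : Int) < n) ∧ position = "begin") ∨
            (¬ ((k : Int) ≥ (l.length : Int) - n) ∧ position = "end")) ↔
            k < t := by
          constructor
          · rintro (⟨_, hpb⟩ | ⟨h, _⟩)
            · exact absurd hpb hnb
            · omega
          · intro h; exact Or.inr ⟨by omega, he⟩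
        rw [List.getElem_map, List.getElem_range]
        by_cases hk : k < t
        · rw [if_pos (hcond.mpr hk), getD_eq_get l k hkl,
            List.getElem_append_left (by simp only [List.length_take]; omega),
            List.getElem_take]
        · rw [if_neg (by rw [hcond]; omega),
            List.getElem_append_right (by simp only [List.length_take]; omega),
            List.getElem_replicate]
    · rw [if_neg he]
      congr 1
      apply List.ext_getElem
      · simp
      · intro k h1 h2
        have hkl : k < l.length := by simpa using h1
        rw [List.getElem_map, List.getElem_range,
          if_neg (by rintro (⟨_, h⟩ | ⟨_, h⟩) <;> [exact hb h; exact he h]),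
          List.getElem_replicate]
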